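-- pv_equiv track=rewrite | github.com/nguyenhuuniem12022005/codePTIT | dayconnganhat.py | find_min_subsequence_length
-- ===== SOURCE A (Python) =====
-- import math
--
-- def find_min_subsequence_length(N, K, A):
--     # Kiểm tra xem K có phải là ước của ít nhất một phần tử trong dãy không
--     has_valid_element = any(a % K == 0 for a in A)
--     if not has_valid_element:
--         return -1
--
--     min_length = float('inf')
--
--     # Duyệt qua tất cả các dãy con liên tiếp
--     for i in range(N):
--         current_gcd = 0
--         for j in range(i, N):
--             current_gcd = math.gcd(current_gcd, A[j])
--             if current_gcd == K:
--                 min_length = min(min_length, j - i + 1)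
--                 break
--             elif current_gcd < K:
--                 break
--
--     return min_length if min_length != float('inf') else -1
-- ===== SOURCE B (Python) =====
-- import math
--
-- def find_min_subsequence_length(N, K, A):
--     # Per-right-endpoint list of the distinct suffix gcds, with the shortest
--     # window realising each; one left-to-right pass, no per-start rescans.
--     best = -1
--     glist = []  # pairs (g, l): g = gcd of the last l elements, l minimal for g
--     for j in range(N):
--         a = A[j]
--         new = []
--         for g, l in glist:
--             ng = math.gcd(g, a)
--             if new and new[-1][0] == ng:
--                 new[-1] = (ng, l + 1)  # later start = shorter window wins
--             else:
--                 new.append((ng, l + 1))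
--         ng = math.gcd(0, a)
--         if new and new[-1][0] == ng:
--             new[-1] = (ng, 1)
--         else:
--             new.append((ng, 1))
--         glist = new
--         for g, l in glist:
--             if g == K and (best == -1 or l < best):
--                 best = l
--     return best
-- ===== Notes on version B (the rewrite author's own statement) =====
-- stated objective: alternative
-- what changed: Replaces A's per-start-index double scan (with an any() prescan and early breaks) by a single left-to-right pass that incrementally maintains, per right endpoint, the list of distinct suffix gcds with the shortest window realising each.
-- outside the precondition, e.g. on find_min_subsequence_length(2, 2, [3]): A returns -1, B raises IndexError; on find_min_subsequence_length(3, 0, []): A returns -1, B raises IndexError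
import Mathlib
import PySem

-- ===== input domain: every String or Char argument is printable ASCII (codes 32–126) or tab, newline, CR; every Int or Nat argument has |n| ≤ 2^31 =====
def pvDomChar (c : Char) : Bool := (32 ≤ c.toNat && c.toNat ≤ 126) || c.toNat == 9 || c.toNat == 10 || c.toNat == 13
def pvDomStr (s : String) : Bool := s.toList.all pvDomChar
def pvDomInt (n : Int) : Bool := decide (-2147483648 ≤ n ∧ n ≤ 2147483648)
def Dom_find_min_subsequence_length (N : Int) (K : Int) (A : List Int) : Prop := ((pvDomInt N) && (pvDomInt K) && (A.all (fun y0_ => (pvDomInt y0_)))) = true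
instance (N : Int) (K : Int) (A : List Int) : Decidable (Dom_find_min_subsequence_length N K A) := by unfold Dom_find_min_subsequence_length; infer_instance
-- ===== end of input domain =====

-- B replaces A's per-start-index double scan (any()-prescan, early breaks) by one left-to-right
-- pass keeping, per right endpoint, the distinct suffix gcds with their shortest window
-- (objective: alternative algorithm; a timing run did not measure B faster).

-- ===== PORT A =====
-- math.gcd on Python ints (any sign) = gcd of absolute values, nonnegative: Int.gcd, cast to Int.
def gI (g a : Int) : Int := (Int.gcd g a : Int)

-- inner 'for j in range(i, N)' loop of A, with its two breaks; ml is min_length (none = inf)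
def pvInnerA (K : Int) (A : List Int) (i : Int) : List Int → Int → Option Int → Option Int
  | [], _, ml => ml
  | j :: rest, g, ml =>
    let g' : Int := gI g (PySem.List.pyGetD A j 0)
    if g' = K then some (match ml with | none => j - i + 1 | some m => min m (j - i + 1))
    else if g' < K then ml
    else pvInnerA K A i rest g' ml

def find_min_subsequence_length (N : Int) (K : Int) (A : List Int) : Int :=
  let has_valid_element := A.any (fun a => PySem.Int.mod a K == 0)
  if has_valid_element = false then -1
  else
    let minLen := (PySem.List.pyRange 0 N 1).foldl
      (fun ml i => pvInnerA K A i (PySem.List.pyRange i N 1) 0 ml) none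
    match minLen with
    | some m => m
    | none => -1

-- ===== PORT B =====
-- append p to acc, overwriting the last entry when it carries the same gcd (Source B's new[-1] update)
def pvMerge (p : Int × Int) (acc : List (Int × Int)) : List (Int × Int) :=
  match acc.getLast? with
  | none => acc ++ [p]
  | some q => if q.1 = p.1 then acc.dropLast ++ [p] else acc ++ [p]

def pvStepB (glist : List (Int × Int)) (a : Int) : List (Int × Int) :=
  let newl := glist.foldl (fun acc p => pvMerge (gI p.1 a, p.2 + 1) acc) []
  pvMerge (gI 0 a, 1) newl

def pvBestScan (K : Int) (glist : List (Int × Int)) (best : Int) : Int :=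
  glist.foldl (fun b p => if p.1 = K ∧ (b = -1 ∨ p.2 < b) then p.2 else b) best

def find_min_subsequence_length_alt (N : Int) (K : Int) (A : List Int) : Int :=
  ((PySem.List.pyRange 0 N 1).foldl
    (fun st j =>
      let a := PySem.List.pyGetD A j 0
      let glist := pvStepB st.1 a
      (glist, pvBestScan K glist st.2))
    (([] : List (Int × Int)), -1)).2

-- ===== PRECONDITION & SPEC =====
-- Pre_ excludes K = 0, where A's 'a % K' raises ZeroDivisionError whenever A is nonempty, and
-- N > len(A), where A's 'A[j]' raises IndexError whenever the scan reaches the end of the list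
-- (on the remaining excluded corners A happens to return -1 early, but B's loop over range(N)
-- itself raises IndexError there).
def Pre_find_min_subsequence_length (N : Int) (K : Int) (A : List Int) : Prop :=
  K ≠ 0 ∧ N ≤ (A.length : Int)
instance (N : Int) (K : Int) (A : List Int) : Decidable (Pre_find_min_subsequence_length N K A) := by
  unfold Pre_find_min_subsequence_length; infer_instance

def pvWitness_find_min_subsequence_length : Int × Int × List Int := (2, 2, [4, 6])

def Spec_find_min_subsequence_length (N : Int) (K : Int) (A : List Int) (out : Int) : Prop := out = find_min_subsequence_length_alt N K A
instance (N : Int) (K : Int) (A : List Int) (out : Int) : Decidable (Spec_find_min_subsequence_length N K A out) := by unfold Spec_find_min_subsequence_length; infer_instance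

-- ===== CLAIM (what is proved, stated in full; the proofs are below) =====
def Claim_equal_find_min_subsequence_length : Prop := ∀ (N : Int) (K : Int) (A : List Int), Dom_find_min_subsequence_length N K A → Pre_find_min_subsequence_length N K A → Spec_find_min_subsequence_length N K A (find_min_subsequence_length N K A)


-- ===== LEMMAS AND PROOFS =====

-- ---------- common notions ----------

-- gcd of a list, as both programs fold it (0-based left fold of math.gcd)
def wgcd (l : List Int) : Int := l.foldl gI 0

-- 'm is the length of a contiguous nonempty window of xs whose gcd is K'
def KwinIn (xs : List Int) (K m : Int) : Prop :=
  ∃ w, w <:+: xs ∧ w ≠ [] ∧ wgcd w = K ∧ (w.length : Int) = m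

-- 'o is the minimum of the set Q' (none = Q empty)
def MinOn (Q : Int → Prop) (o : Option Int) : Prop :=
  (o = none ∧ ∀ m, ¬ Q m) ∨ ∃ m, o = some m ∧ Q m ∧ ∀ m', Q m' → m ≤ m'

-- Int best with -1 sentinel, as an Option
def ob (b : Int) : Option Int := if b = -1 then none else some b

-- list-level version of A's inner loop (c = elements consumed so far)
def innerL (K : Int) : List Int → Int → Int → Option Int → Option Int
  | [], _, _, ml => ml
  | a :: t, g, c, ml =>
    if gI g a = K then some (match ml with | none => c + 1 | some m => min m (c + 1))
    else if gI g a < K then ml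
    else innerL K t (gI g a) (c + 1) ml

-- list-level version of A's outer loop (one start per suffix)
def listA (K : Int) : List Int → Option Int → Option Int
  | [], ml => ml
  | a :: t, ml => listA K t (innerL K (a :: t) 0 0 ml)

-- ideal (undeduplicated) per-right-endpoint suffix-gcd list
def stepP (ps : List (Int × Int)) (a : Int) : List (Int × Int) :=
  ps.map (fun p => (gI p.1 a, p.2 + 1)) ++ [(gI 0 a, 1)]

def Pfun (xs : List Int) : List (Int × Int) := xs.foldl stepP []

-- dedup of adjacent equal gcds, keeping the last (= shortest) entry of each run
def ddr : List (Int × Int) → List (Int × Int)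
  | [] => []
  | [x] => [x]
  | x :: y :: t => if x.1 = y.1 then ddr (y :: t) else x :: ddr (y :: t)

-- ---------- gI / wgcd facts ----------

lemma gI_nonneg (g a : Int) : 0 ≤ gI g a := by unfold gI; positivity

lemma gI_dvd_left (g a : Int) : gI g a ∣ g := by simpa [gI] using Int.gcd_dvd_left g a

lemma wgcd_snoc (u : List Int) (a : Int) : wgcd (u ++ [a]) = gI (wgcd u) a := by
  simp [wgcd, List.foldl_append]

lemma foldl_gI_dvd (z : Int) (v : List Int) : v.foldl gI z ∣ z := by
  induction v generalizing z with
  | nil => simp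
  | cons a t ih => exact dvd_trans (ih (gI z a)) (gI_dvd_left z a)

lemma foldl_gI_nonneg (t : List Int) (z : Int) (hz : 0 ≤ z) : 0 ≤ t.foldl gI z := by
  induction t generalizing z with
  | nil => exact hz
  | cons a t ih => exact ih _ (gI_nonneg z a)

lemma gI_dvd_right (g a : Int) : gI g a ∣ a := by simpa [gI] using Int.gcd_dvd_right g a

lemma wgcd_nonneg (l : List Int) : 0 ≤ wgcd l :=
  foldl_gI_nonneg l 0 le_rfl

lemma wgcd_append_left_dvd (u v : List Int) : wgcd (u ++ v) ∣ wgcd u := by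
  simpa [wgcd, List.foldl_append] using foldl_gI_dvd (wgcd u) v

lemma wgcd_dvd_mem (l : List Int) (x : Int) (hx : x ∈ l) : wgcd l ∣ x := by
  obtain ⟨u, v, rfl⟩ := List.append_of_mem hx
  have h1 : wgcd (u ++ x :: v) = v.foldl gI (gI (u.foldl gI 0) x) := by
    simp [wgcd, List.foldl_append]
  rw [h1]
  exact dvd_trans (foldl_gI_dvd _ v) (gI_dvd_right _ x)

lemma wgcd_zeros_prefix (u v : List Int) (hu : wgcd u = 0) : wgcd (u ++ v) = wgcd v := by
  simp [wgcd, List.foldl_append] at *; rw [hu]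

-- ---------- MinOn ----------

lemma MinOn_unique (Q : Int → Prop) (o₁ o₂ : Option Int)
    (h₁ : MinOn Q o₁) (h₂ : MinOn Q o₂) : o₁ = o₂ := by
  rcases h₁ with ⟨e1, hn1⟩ | ⟨m1, e1, q1, min1⟩ <;>
    rcases h₂ with ⟨e2, hn2⟩ | ⟨m2, e2, q2, min2⟩
  · rw [e1, e2]
  · exact absurd q2 (hn1 m2)
  · exact absurd q1 (hn2 m1)
  · rw [e1, e2]
    exact congrArg some (le_antisymm (min1 m2 q2) (min2 m1 q1))

lemma MinOn_congr (Q Q' : Int → Prop) (o : Option Int)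
    (h : ∀ m, Q m ↔ Q' m) (hm : MinOn Q o) : MinOn Q' o := by
  rcases hm with ⟨e, hn⟩ | ⟨m, e, q, hmin⟩
  · exact Or.inl ⟨e, fun m hm' => hn m ((h m).mpr hm')⟩
  · exact Or.inr ⟨m, e, (h m).mp q, fun m' hm' => hmin m' ((h m').mpr hm')⟩

-- ---------- ddr layer ----------

lemma ddr_ne_nil (u : List (Int × Int)) (h : u ≠ []) : ddr u ≠ [] := by
  induction u with
  | nil => simp at h
  | cons x t ih =>
    cases t with
    | nil => simp [ddr]
    | cons y s =>
      by_cases hxy : x.1 = y.1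
      · simpa [ddr, hxy] using ih (by simp)
      · simp [ddr, hxy]

lemma ddr_head_fst (x : Int × Int) (t : List (Int × Int)) :
    (ddr (x :: t)).head?.map (·.1) = some x.1 := by
  induction t generalizing x with
  | nil => simp [ddr]
  | cons y s ih =>
    by_cases hxy : x.1 = y.1
    · rw [show ddr (x :: y :: s) = ddr (y :: s) by simp [ddr, hxy], ih y, hxy]
    · simp [ddr, hxy]

lemma pvMerge_cons (p x : Int × Int) (r : List (Int × Int)) (h : r ≠ []) :
    pvMerge p (x :: r) = x :: pvMerge p r := by
  have hl : (x :: r).getLast? = r.getLast? := by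
    cases r with
    | nil => simp at h
    | cons y s => simp [List.getLast?_cons_cons]
  cases hg : r.getLast? with
  | none => simp [List.getLast?_eq_none_iff] at hg; exact absurd hg h
  | some q =>
    unfold pvMerge
    rw [hl, hg]
    by_cases hq : q.1 = p.1 <;> simp [hq, List.dropLast_cons_of_ne_nil h]

lemma ddr_snoc (u : List (Int × Int)) (p : Int × Int) :
    ddr (u ++ [p]) = pvMerge p (ddr u) := by
  induction u with
  | nil => simp [ddr, pvMerge]
  | cons x t ih =>
    cases t with
    | nil => by_cases h : x.1 = p.1 <;> simp [ddr, pvMerge, h]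
    | cons y s =>
      simp only [List.cons_append] at ih ⊢
      by_cases h : x.1 = y.1
      · rw [show ddr (x :: y :: (s ++ [p])) = ddr (y :: (s ++ [p])) from by simp [ddr, h],
            show ddr (x :: y :: s) = ddr (y :: s) from by simp [ddr, h]]
        exact ih
      · rw [show ddr (x :: y :: (s ++ [p])) = x :: ddr (y :: (s ++ [p])) from by simp [ddr, h],
            show ddr (x :: y :: s) = x :: ddr (y :: s) from by simp [ddr, h], ih]
        exact (pvMerge_cons p x _ (ddr_ne_nil _ (by simp))).symm

lemma mergeAll_eq_ddr (xs : List (Int × Int)) :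
    xs.foldl (fun acc p => pvMerge p acc) [] = ddr xs := by
  induction xs using List.reverseRecOn with
  | nil => rfl
  | append_singleton u p ih => rw [List.foldl_append, List.foldl_cons, List.foldl_nil, ih, ddr_snoc]

lemma ddr_cons_congr (z : Int × Int) (u v : List (Int × Int))
    (h : ddr u = ddr v) (hh : u.head?.map (·.1) = v.head?.map (·.1)) :
    ddr (z :: u) = ddr (z :: v) := by
  cases u with
  | nil =>
    cases v with
    | nil => rfl
    | cons b t => simp at hh
  | cons a s =>
    cases v with
    | nil => simp at hh
    | cons b t =>
      simp only [List.head?_cons, Option.map_some] at hh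
      have hab : a.1 = b.1 := by simpa using hh
      by_cases hz : z.1 = a.1
      · rw [show ddr (z :: a :: s) = ddr (a :: s) by simp [ddr, hz],
            show ddr (z :: b :: t) = ddr (b :: t) by simp [ddr, hab ▸ hz]]
        exact h
      · rw [show ddr (z :: a :: s) = z :: ddr (a :: s) by simp [ddr, hz],
            show ddr (z :: b :: t) = z :: ddr (b :: t) by simp [ddr, hab ▸ hz], h]

lemma ddr_map (a : Int) (ps : List (Int × Int)) :
    ddr (ps.map (fun p => (gI p.1 a, p.2 + 1))) =
    ddr ((ddr ps).map (fun p => (gI p.1 a, p.2 + 1))) := by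
  induction ps with
  | nil => rfl
  | cons x t ih =>
    cases t with
    | nil => rfl
    | cons y s =>
      by_cases h : x.1 = y.1
      · rw [show ddr (x :: y :: s) = ddr (y :: s) by simp [ddr, h]]
        rw [List.map_cons, List.map_cons,
            show ddr ((gI x.1 a, x.2 + 1) :: (gI y.1 a, y.2 + 1) :: List.map _ s) =
              ddr ((gI y.1 a, y.2 + 1) :: List.map (fun p => (gI p.1 a, p.2 + 1)) s) by
                simp [ddr, h]]
        exact ih
      · rw [show ddr (x :: y :: s) = x :: ddr (y :: s) by simp [ddr, h],
            List.map_cons, List.map_cons]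
        refine ddr_cons_congr _ _ _ ?_ ?_
        · simpa using ih
        · obtain ⟨hd, tl, hdt⟩ : ∃ hd tl, ddr (y :: s) = hd :: tl := by
            cases hds : ddr (y :: s) with
            | nil => exact absurd hds (ddr_ne_nil _ (by simp))
            | cons hd tl => exact ⟨hd, tl, rfl⟩
          have hfst : hd.1 = y.1 := by
            have := ddr_head_fst y s
            rw [hdt] at this; simpa using this
          simp [hdt, hfst]

lemma stepB_eq_ddr_stepP (ps : List (Int × Int)) (a : Int) :
    pvStepB (ddr ps) a = ddr (stepP ps a) := by
  unfold pvStepB stepP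
  rw [show ((ddr ps).foldl (fun acc p => pvMerge (gI p.1 a, p.2 + 1) acc) []) =
      (((ddr ps).map (fun p => (gI p.1 a, p.2 + 1))).foldl (fun acc q => pvMerge q acc) []) by
    rw [List.foldl_map]]
  rw [mergeAll_eq_ddr, ← ddr_map, ← ddr_snoc]

lemma upd_collapse (K : Int) (b : Int) (x y : Int × Int)
    (h1 : x.1 = y.1) (h2 : y.2 < x.2) (hx : 1 ≤ x.2) :
    (if y.1 = K ∧ ((if x.1 = K ∧ (b = -1 ∨ x.2 < b) then x.2 else b) = -1 ∨
        y.2 < (if x.1 = K ∧ (b = -1 ∨ x.2 < b) then x.2 else b))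
      then y.2 else (if x.1 = K ∧ (b = -1 ∨ x.2 < b) then x.2 else b)) =
    (if y.1 = K ∧ (b = -1 ∨ y.2 < b) then y.2 else b) := by
  split_ifs <;> omega

lemma bestScan_ddr (K : Int) (ps : List (Int × Int)) (b : Int)
    (hc : ps.IsChain (fun p q => q.2 < p.2)) (hp : ∀ p ∈ ps, 1 ≤ p.2) :
    pvBestScan K (ddr ps) b = pvBestScan K ps b := by
  induction ps generalizing b with
  | nil => rfl
  | cons x t ih =>
    cases t with
    | nil => rfl
    | cons y s =>
      have hyx : y.2 < x.2 := (List.isChain_cons_cons.mp hc).1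
      have hc' : (y :: s).IsChain (fun p q => q.2 < p.2) := (List.isChain_cons_cons.mp hc).2
      have hp' : ∀ p ∈ y :: s, 1 ≤ p.2 := fun p hp'' => hp p (List.mem_cons_of_mem _ hp'')
      by_cases h : x.1 = y.1
      · rw [show ddr (x :: y :: s) = ddr (y :: s) from by simp [ddr, h]]
        rw [ih b hc' hp']
        unfold pvBestScan
        simp only [List.foldl_cons]
        rw [upd_collapse K b x y h hyx (hp x (by simp))]
      · rw [show ddr (x :: y :: s) = x :: ddr (y :: s) from by simp [ddr, h]]
        show pvBestScan K (ddr (y :: s)) _ = pvBestScan K (y :: s) _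
        exact ih _ hc' hp'

-- ---------- Pfun characterization ----------

lemma Pfun_snoc (xs : List Int) (a : Int) : Pfun (xs ++ [a]) = stepP (Pfun xs) a := by
  simp [Pfun, List.foldl_append]

lemma Pfun_eq (xs : List Int) :
    Pfun xs = (List.range xs.length).map
      (fun i => (wgcd (xs.drop i), ((xs.length - i : Nat) : Int))) := by
  induction xs using List.reverseRecOn with
  | nil => rfl
  | append_singleton u a ih =>
    rw [Pfun_snoc, ih]
    unfold stepP
    rw [List.map_map]
    have hlen : (u ++ [a]).length = u.length + 1 := by simp
    rw [hlen, List.range_succ, List.map_append]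
    congr 1
    · apply List.map_congr_left
      intro i hi
      have hi' : i < u.length := List.mem_range.mp hi
      have hdrop : (u ++ [a]).drop i = u.drop i ++ [a] :=
        List.drop_append_of_le_length (le_of_lt hi')
      simp only [Function.comp_apply, hdrop, wgcd_snoc]
      refine Prod.ext rfl ?_
      simp only
      omega
    · have hd : (u ++ [a]).drop u.length = [a] := List.drop_left
      simp only [List.map_cons, List.map_nil, hd]
      refine congrArg (fun z => [z]) (Prod.ext ?_ ?_)
      · simp [wgcd]
      · simp only
        omega

lemma Pfun_snd_chain (xs : List Int) : (Pfun xs).IsChain (fun p q => q.2 < p.2) := by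
  rw [Pfun_eq, List.isChain_map]
  cases hn : xs.length with
  | zero => simp
  | succ n =>
    rw [List.isChain_range_succ]
    intro m hm
    simp only
    omega

lemma Pfun_snd_pos (xs : List Int) : ∀ p ∈ Pfun xs, 1 ≤ p.2 := by
  rw [Pfun_eq]
  intro p hp
  obtain ⟨i, hi, rfl⟩ := List.mem_map.mp hp
  have : i < xs.length := List.mem_range.mp hi
  simp only
  omega

lemma Pfun_mem_iff (xs : List Int) (K m : Int) :
    (∃ p ∈ Pfun xs, p.1 = K ∧ p.2 = m) ↔
    (∃ w, w <:+ xs ∧ w ≠ [] ∧ wgcd w = K ∧ (w.length : Int) = m) := by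
  rw [Pfun_eq]
  constructor
  · rintro ⟨p, hp, hK, hm⟩
    obtain ⟨i, hi, rfl⟩ := List.mem_map.mp hp
    have hilt : i < xs.length := List.mem_range.mp hi
    refine ⟨xs.drop i, List.drop_suffix i xs, ?_, hK, ?_⟩
    · intro hnil
      have := congrArg List.length hnil
      simp at this
      omega
    · rw [List.length_drop]
      exact hm
  · rintro ⟨w, hsuf, hne, hK, hm⟩
    obtain ⟨u, rfl⟩ := hsuf
    have hlen : w.length ≠ 0 := fun h => hne (List.length_eq_zero_iff.mp h)
    refine ⟨(wgcd ((u ++ w).drop u.length), (((u ++ w).length - u.length : Nat) : Int)),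
      List.mem_map.mpr ⟨u.length, List.mem_range.mpr (by rw [List.length_append]; omega), rfl⟩,
      ?_, ?_⟩
    · simpa [List.drop_left] using hK
    · simp only [List.length_append]
      omega

-- ---------- best scan accumulates minima ----------

lemma upd_MinOn (K : Int) (Q : Int → Prop) (b : Int) (c l : Int)
    (h : MinOn Q (ob b)) (hl : 1 ≤ l) :
    MinOn (fun m => Q m ∨ (c = K ∧ m = l)) (ob (if c = K ∧ (b = -1 ∨ l < b) then l else b)) := by
  by_cases hcK : c = K
  · rcases h with ⟨he, hn⟩ | ⟨m, he, hQ, hmin⟩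
    · have hb : b = -1 := by
        by_contra hb; simp [ob, hb] at he
      rw [if_pos ⟨hcK, Or.inl hb⟩]
      refine Or.inr ⟨l, by simp [ob]; omega, Or.inr ⟨hcK, rfl⟩, ?_⟩
      rintro m' (hm' | ⟨-, rfl⟩)
      · exact absurd hm' (hn m')
      · exact le_rfl
    · have hbm : b ≠ -1 ∧ b = m := by
        by_cases hb : b = -1
        · simp [ob, hb] at he
        · simp [ob, hb] at he; exact ⟨hb, he⟩
      obtain ⟨hb1, rfl⟩ := hbm
      by_cases hlt : l < b
      · rw [if_pos ⟨hcK, Or.inr hlt⟩]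
        refine Or.inr ⟨l, by simp [ob]; omega, Or.inr ⟨hcK, rfl⟩, ?_⟩
        rintro m' (hm' | ⟨-, rfl⟩)
        · exact le_trans (le_of_lt hlt) (hmin m' hm')
        · exact le_rfl
      · rw [if_neg (by tauto)]
        refine Or.inr ⟨b, he, Or.inl hQ, ?_⟩
        rintro m' (hm' | ⟨-, rfl⟩)
        · exact hmin m' hm'
        · omega
  · rw [if_neg (by tauto)]
    exact MinOn_congr _ _ _ (fun m => by tauto) h

lemma bestScan_MinOn (K : Int) (ps : List (Int × Int)) (b : Int) (Q : Int → Prop)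
    (h : MinOn Q (ob b)) (hp : ∀ p ∈ ps, 1 ≤ p.2) :
    MinOn (fun m => Q m ∨ ∃ p ∈ ps, p.1 = K ∧ p.2 = m) (ob (pvBestScan K ps b)) := by
  induction ps generalizing b Q with
  | nil => exact MinOn_congr _ _ _ (fun m => by simp) h
  | cons p t ih =>
    have h1 := upd_MinOn K Q b p.1 p.2 h (hp p (by simp))
    have h2 := ih _ _ h1 (fun q hq => hp q (List.mem_cons_of_mem _ hq))
    have e : pvBestScan K (p :: t) b =
        pvBestScan K t (if p.1 = K ∧ (b = -1 ∨ p.2 < b) then p.2 else b) := rfl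
    rw [e]
    refine MinOn_congr _ _ _ (fun m => ?_) h2
    simp only [List.mem_cons]
    constructor
    · rintro ((hQ | ⟨hpK, hml⟩) | ⟨q, hq, hqK, hqm⟩)
      · exact Or.inl hQ
      · exact Or.inr ⟨p, Or.inl rfl, hpK, hml.symm⟩
      · exact Or.inr ⟨q, Or.inr hq, hqK, hqm⟩
    · rintro (hQ | ⟨q, (rfl | hq), hqK, hqm⟩)
      · exact Or.inl (Or.inl hQ)
      · exact Or.inl (Or.inr ⟨hqK, hqm.symm⟩)
      · exact Or.inr ⟨q, hq, hqK, hqm⟩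

-- ---------- window decomposition ----------

lemma infix_snoc_iff (w xs : List Int) (a : Int) :
    w <:+: xs ++ [a] ↔ w <:+: xs ∨ w <:+ xs ++ [a] := by
  have h1 : (xs ++ [a]).reverse = a :: xs.reverse := by simp
  constructor
  · intro h
    have hr := List.reverse_infix.mpr h
    rw [h1] at hr
    rcases List.infix_cons_iff.mp hr with hpre | hinf
    · right
      rw [← h1] at hpre
      exact List.reverse_prefix.mp hpre
    · left
      exact List.reverse_infix.mp hinf
  · rintro (h | h)
    · exact h.trans ⟨[], [a], by simp⟩
    · exact h.isInfix

lemma KwinIn_snoc (xs : List Int) (a : Int) (K m : Int) :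
    KwinIn (xs ++ [a]) K m ↔
    KwinIn xs K m ∨ ∃ w, w <:+ xs ++ [a] ∧ w ≠ [] ∧ wgcd w = K ∧ (w.length : Int) = m := by
  unfold KwinIn
  constructor
  · rintro ⟨w, hinf, hne, hg, hl⟩
    rcases (infix_snoc_iff w xs a).mp hinf with h | h
    · exact Or.inl ⟨w, h, hne, hg, hl⟩
    · exact Or.inr ⟨w, h, hne, hg, hl⟩
  · rintro (⟨w, hinf, hne, hg, hl⟩ | ⟨w, hsuf, hne, hg, hl⟩)
    · exact ⟨w, (infix_snoc_iff w xs a).mpr (Or.inl hinf), hne, hg, hl⟩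
    · exact ⟨w, (infix_snoc_iff w xs a).mpr (Or.inr hsuf), hne, hg, hl⟩

-- ---------- B-side invariant ----------

lemma B_fold_inv (K : Int) (xs : List Int) :
    (xs.foldl (fun st a => let gl := pvStepB st.1 a; (gl, pvBestScan K gl st.2))
      (([] : List (Int × Int)), -1)).1 = ddr (Pfun xs) ∧
    MinOn (KwinIn xs K)
      (ob (xs.foldl (fun st a => let gl := pvStepB st.1 a; (gl, pvBestScan K gl st.2))
        (([] : List (Int × Int)), -1)).2) := by
  induction xs using List.reverseRecOn with
  | nil =>
    refine ⟨rfl, Or.inl ⟨rfl, ?_⟩⟩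
    rintro m ⟨w, hinf, hne, -, -⟩
    exact hne (List.eq_nil_of_infix_nil hinf)
  | append_singleton u a ih =>
    obtain ⟨ih1, ih2⟩ := ih
    rw [List.foldl_append, List.foldl_cons, List.foldl_nil]
    set st := u.foldl (fun st a => let gl := pvStepB st.1 a; (gl, pvBestScan K gl st.2))
      (([] : List (Int × Int)), -1) with hst
    have hgl : pvStepB st.1 a = ddr (Pfun (u ++ [a])) := by
      rw [ih1, stepB_eq_ddr_stepP, Pfun_snoc]
    refine ⟨hgl, ?_⟩
    show MinOn _ (ob (pvBestScan K (pvStepB st.1 a) st.2))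
    rw [hgl, bestScan_ddr K _ _ (Pfun_snd_chain _) (Pfun_snd_pos _)]
    have h2 := bestScan_MinOn K (Pfun (u ++ [a])) st.2 (KwinIn u K) ih2 (Pfun_snd_pos _)
    refine MinOn_congr _ _ _ (fun m => ?_) h2
    rw [KwinIn_snoc, Pfun_mem_iff]

-- ---------- A-side inner loop ----------

lemma innerL_sound (K : Int) (l : List Int) (p : List Int) (c : Int) (ml : Option Int) (m : Int)
    (hc : c = (p.length : Int))
    (h : innerL K l (wgcd p) c ml = some m) :
    ml = some m ∨ ∃ s : Nat, 0 < s ∧ s ≤ l.length ∧ wgcd (p ++ l.take s) = K ∧ m = c + s := by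
  induction l generalizing p c ml with
  | nil => exact Or.inl h
  | cons a t ih =>
    simp only [innerL] at h
    by_cases h1 : gI (wgcd p) a = K
    · rw [if_pos h1] at h
      have hwk : wgcd (p ++ (a :: t).take 1) = K := by
        rw [show p ++ (a :: t).take 1 = p ++ [a] from by simp, wgcd_snoc]
        exact h1
      cases hml : ml with
      | none =>
        rw [hml] at h
        have hm : m = c + 1 := by simpa using h.symm
        exact Or.inr ⟨1, one_pos, by simp, hwk, by push_cast; omega⟩
      | some m0 =>
        rw [hml] at h
        have hm : m = min m0 (c + 1) := by simpa using h.symm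
        by_cases hle : m0 ≤ c + 1
        · left; exact congrArg some (by omega)
        · exact Or.inr ⟨1, one_pos, by simp, hwk, by push_cast; omega⟩
    · rw [if_neg h1] at h
      by_cases h2 : gI (wgcd p) a < K
      · rw [if_pos h2] at h; exact Or.inl h
      · rw [if_neg h2] at h
        rw [show gI (wgcd p) a = wgcd (p ++ [a]) from (wgcd_snoc p a).symm] at h
        rcases ih (p ++ [a]) (c + 1) ml (by rw [hc]; simp) h with hl | ⟨s, hs0, hsle, hw, hm⟩
        · exact Or.inl hl
        · refine Or.inr ⟨s + 1, by omega, by simpa using hsle, ?_, by push_cast at hm ⊢; omega⟩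
          rw [show p ++ (a :: t).take (s + 1) = (p ++ [a]) ++ t.take s from by simp]
          exact hw

lemma innerL_mono (K : Int) (l : List Int) (g c : Int) (ml : Option Int) (m₀ : Int)
    (h : ml = some m₀) : ∃ m, innerL K l g c ml = some m ∧ m ≤ m₀ := by
  subst h
  induction l generalizing g c with
  | nil => exact ⟨m₀, rfl, le_rfl⟩
  | cons a t ih =>
    simp only [innerL]
    split_ifs with h1 h2
    · exact ⟨min m₀ (c + 1), rfl, min_le_left _ _⟩
    · exact ⟨m₀, rfl, le_rfl⟩
    · exact ih _ _

lemma innerL_complete (K : Int) (_hK : 0 < K) (l : List Int) (p : List Int) (c : Int)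
    (ml : Option Int) (hc : c = (p.length : Int)) :
    ∀ s : Nat, 0 < s → s ≤ l.length → wgcd (p ++ l.take s) = K →
      (∃ m, innerL K l (wgcd p) c ml = some m ∧ m ≤ c + s) ∨
      (∃ w, w ≠ [] ∧ w <:+: l ∧ wgcd w = K ∧ (w.length : Int) < c + s) := by
  induction l generalizing p c with
  | nil =>
    intro s hs0 hsle _
    simp at hsle
    omega
  | cons a t ih =>
    intro s hs0 hsle hw
    have hsnoc : gI (wgcd p) a = wgcd (p ++ [a]) := (wgcd_snoc p a).symm
    simp only [innerL]
    split_ifs with h1 h2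
    · cases hml : ml with
      | none => exact Or.inl ⟨c + 1, rfl, by omega⟩
      | some m0 =>
        refine Or.inl ⟨min m0 (c + 1), rfl, ?_⟩
        have := min_le_right m0 (c + 1)
        omega
    · -- gI (wgcd p) a < K : the running gcd must be 0 here
      have hdvd : K ∣ wgcd (p ++ [a]) := by
        have hsplit : p ++ (a :: t).take s = (p ++ [a]) ++ t.take (s - 1) := by
          cases s with
          | zero => exact absurd hs0 (lt_irrefl 0)
          | succ s' => simp
        rw [hsplit] at hw
        exact hw ▸ wgcd_append_left_dvd (p ++ [a]) (t.take (s - 1))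
      rw [hsnoc] at h1 h2
      have hg0 : wgcd (p ++ [a]) = 0 := by
        rcases eq_or_lt_of_le (wgcd_nonneg (p ++ [a])) with he | hlt0
        · exact he.symm
        · exact absurd (Int.le_of_dvd hlt0 hdvd) (by omega)
      cases s with
      | zero => exact absurd hs0 (lt_irrefl 0)
      | succ s' =>
        cases s' with
        | zero =>
          exfalso
          have hwk : wgcd (p ++ [a]) = K := by simpa using hw
          omega
        | succ s'' =>
          right
          have hsle' : s'' + 1 ≤ t.length := by simpa using hsle
          refine ⟨t.take (s'' + 1), ?_, List.infix_cons (List.take_prefix _ t).isInfix, ?_, ?_⟩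
          · intro hnil
            have := congrArg List.length hnil
            rw [List.length_take, List.length_nil] at this
            omega
          · have hsplit : p ++ (a :: t).take (s'' + 2) = (p ++ [a]) ++ t.take (s'' + 1) := by simp
            rw [hsplit] at hw
            rw [← wgcd_zeros_prefix (p ++ [a]) (t.take (s'' + 1)) hg0]
            exact hw
          · have hlt : (t.take (s'' + 1)).length = s'' + 1 := by
              rw [List.length_take]
              omega
            rw [hlt]
            have hc0 : 0 ≤ c := by rw [hc]; positivity
            push_cast
            omega
    · -- recurse
      cases s with
      | zero => exact absurd hs0 (lt_irrefl 0)
      | succ s' =>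
        cases s' with
        | zero =>
          exfalso
          have hwk : wgcd (p ++ [a]) = K := by simpa using hw
          rw [hsnoc] at h1
          exact h1 hwk
        | succ s'' =>
          have hsplit : p ++ (a :: t).take (s'' + 2) = (p ++ [a]) ++ t.take (s'' + 1) := by simp
          rw [hsplit] at hw
          have hc' : c + 1 = ((p ++ [a]).length : Int) := by rw [hc]; simp
          rw [hsnoc]
          rcases ih (p ++ [a]) (c + 1) hc' (s'' + 1) (by omega) (by simpa using hsle) hw with
            ⟨m, hm, hle⟩ | ⟨w, hne, hinf, hwK, hlen⟩
          · exact Or.inl ⟨m, hm, by push_cast at hle ⊢; omega⟩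
          · exact Or.inr ⟨w, hne, List.infix_cons hinf, hwK, by push_cast at hlen ⊢; omega⟩

lemma innerL_neg (K : Int) (hK : K < 0) (l : List Int) (g c : Int) (ml : Option Int) :
    innerL K l g c ml = ml := by
  induction l generalizing g c with
  | nil => rfl
  | cons a t ih =>
    have h1 : gI g a ≠ K := by have := gI_nonneg g a; omega
    have h2 : ¬ (gI g a < K) := by have := gI_nonneg g a; omega
    simp only [innerL, if_neg h1, if_neg h2]
    exact ih _ _

-- ---------- A-side outer loop ----------

lemma listA_sound (K : Int) (t : List Int) (ml : Option Int) (m : Int)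
    (h : listA K t ml = some m) : ml = some m ∨ KwinIn t K m := by
  induction t generalizing ml with
  | nil => exact Or.inl h
  | cons a s ih =>
    rcases ih _ h with hml | ⟨w, hi, hn, hk, hl⟩
    · rcases innerL_sound K (a :: s) [] 0 ml m (by simp) hml with h' | ⟨sz, hs0, hsle, hwg, hm⟩
      · exact Or.inl h'
      · right
        refine ⟨(a :: s).take sz, (List.take_prefix _ _).isInfix, ?_, by simpa using hwg, ?_⟩
        · intro hnil
          have := congrArg List.length hnil
          simp [List.length_take] at this
          omega
        · rw [List.length_take]
          push_cast
          omega
    · exact Or.inr ⟨w, List.infix_cons hi, hn, hk, hl⟩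

lemma listA_mono (K : Int) (t : List Int) (ml : Option Int) (m₀ : Int)
    (h : ml = some m₀) : ∃ m, listA K t ml = some m ∧ m ≤ m₀ := by
  induction t generalizing ml m₀ with
  | nil => exact ⟨m₀, h ▸ rfl, le_rfl⟩
  | cons a s ih =>
    obtain ⟨m1, hm1, hle1⟩ := innerL_mono K (a :: s) 0 0 ml m₀ h
    obtain ⟨m, hm, hle⟩ := ih _ _ hm1
    exact ⟨m, hm, le_trans hle hle1⟩

lemma listA_complete (K : Int) (hK : 0 < K) (t : List Int) (ml : Option Int) :
    ∀ w, w <:+: t → w ≠ [] → wgcd w = K →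
      (∃ m, listA K t ml = some m ∧ m ≤ (w.length : Int)) ∨
      (∃ w', w' <:+: t ∧ w' ≠ [] ∧ wgcd w' = K ∧ w'.length < w.length) := by
  induction t generalizing ml with
  | nil =>
    intro w hinf hne _
    exact absurd (List.eq_nil_of_infix_nil hinf) hne
  | cons a s ih =>
    intro w hinf hne hwg
    rcases List.infix_cons_iff.mp hinf with hpre | hinf2
    · have hw_take : w = (a :: s).take w.length := List.prefix_iff_eq_take.mp hpre
      have hlen_le : w.length ≤ (a :: s).length := hpre.length_le
      have hlen_pos : 0 < w.length := List.length_pos_iff.mpr hne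
      have hwg' : wgcd ([] ++ (a :: s).take w.length) = K := by
        rw [List.nil_append, ← hw_take]
        exact hwg
      rcases innerL_complete K hK (a :: s) [] 0 ml (by simp) w.length hlen_pos hlen_le hwg' with
        ⟨m, hm, hle⟩ | ⟨w', hne', hinf', hwK', hlen'⟩
      · obtain ⟨m2, hm2, hle2⟩ := listA_mono K s (innerL K (a :: s) 0 0 ml) m hm
        refine Or.inl ⟨m2, hm2, ?_⟩
        simp at hle
        omega
      · refine Or.inr ⟨w', hinf', hne', hwK', ?_⟩
        simp at hlen'
        omega
    · rcases ih (innerL K (a :: s) 0 0 ml) w hinf2 hne hwg with ⟨m, hm, hle⟩ | ⟨w', hi', hn', hk', hl'⟩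
      · exact Or.inl ⟨m, hm, hle⟩
      · exact Or.inr ⟨w', List.infix_cons hi', hn', hk', hl'⟩

lemma listA_neg (K : Int) (hK : K < 0) (t : List Int) (ml : Option Int) :
    listA K t ml = ml := by
  induction t generalizing ml with
  | nil => rfl
  | cons a s ih =>
    show listA K s (innerL K (a :: s) 0 0 ml) = ml
    rw [innerL_neg K hK, ih]

lemma listA_MinOn (K : Int) (hK : 0 < K) (xs : List Int) :
    MinOn (KwinIn xs K) (listA K xs none) := by
  have sound : ∀ m, listA K xs none = some m → KwinIn xs K m := by
    intro m h
    rcases listA_sound K xs none m h with h' | h'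
    · simp at h'
    · exact h'
  have comp : ∀ (n : Nat) (w : List Int), w <:+: xs → w ≠ [] → wgcd w = K → w.length ≤ n →
      ∃ m, listA K xs none = some m ∧ m ≤ (w.length : Int) := by
    intro n
    induction n with
    | zero =>
      intro w _ hne _ hle
      have : w.length = 0 := by omega
      exact absurd (List.length_eq_zero_iff.mp this) hne
    | succ n ihn =>
      intro w hinf hne hwg hle
      rcases listA_complete K hK xs none w hinf hne hwg with ⟨m, hm, hml⟩ | ⟨w', hi', hn', hk', hl'⟩
      · exact ⟨m, hm, hml⟩
      · obtain ⟨m, hm, hml⟩ := ihn w' hi' hn' hk' (by omega)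
        refine ⟨m, hm, ?_⟩
        have : (w'.length : Int) ≤ (w.length : Int) := by omega
        omega
  by_cases hex : ∃ m, KwinIn xs K m
  · obtain ⟨m₀, w, hinf, hne, hwg, hlen⟩ := hex
    obtain ⟨m, hm, hml⟩ := comp w.length w hinf hne hwg le_rfl
    refine Or.inr ⟨m, hm, sound m hm, ?_⟩
    rintro m' ⟨w', hi', hn', hk', hl'⟩
    obtain ⟨m2, hm2, hml2⟩ := comp w'.length w' hi' hn' hk' le_rfl
    rw [hm] at hm2
    have hm2' : m = m2 := Option.some.inj hm2
    omega
  · left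
    refine ⟨?_, fun m hm => hex ⟨m, hm⟩⟩
    cases hr : listA K xs none with
    | none => rfl
    | some m => exact absurd ⟨m, sound m hr⟩ hex

-- ---------- bridges to the ports ----------

lemma innerA_bridge (K : Int) (A : List Int) (N i j g : Int) (ml : Option Int)
    (h0 : 0 ≤ i) (hij : i ≤ j) (hjN : j ≤ N) (hN : N ≤ (A.length : Int)) :
    pvInnerA K A i (PySem.List.pyRange j N 1) g ml =
    innerL K ((A.take N.toNat).drop j.toNat) g (j - i) ml := by
  have haux : ∀ (n : Nat) (j g : Int) (ml : Option Int), (N - j).toNat = n → i ≤ j → j ≤ N →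
      pvInnerA K A i (PySem.List.pyRange j N 1) g ml =
      innerL K ((A.take N.toNat).drop j.toNat) g (j - i) ml := by
    intro n
    induction n with
    | zero =>
      intro j g ml hn hij' hjN'
      rw [PySem.List.pyRange_one_eq_nil (by omega)]
      rw [show (A.take N.toNat).drop j.toNat = [] from by
        rw [List.drop_eq_nil_iff, List.length_take]; omega]
      rfl
    | succ n ihn =>
      intro j g ml hn hij' hjN'
      have hjltN : j < N := by omega
      have h0j : 0 ≤ j := le_trans h0 hij'
      have hjlen : j.toNat < (A.take N.toNat).length := by
        rw [List.length_take]; omega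
      rw [PySem.List.pyRange_one_cons hjltN, List.drop_eq_getElem_cons hjlen]
      have hget : PySem.List.pyGetD A j 0 = (A.take N.toNat)[j.toNat]'hjlen := by
        rw [PySem.List.pyGetD_eq_getElem A 0 h0j (by omega)]
        exact (List.getElem_take).symm
      have hrec := ihn (j + 1) (gI g (PySem.List.pyGetD A j 0)) ml (by omega) (by omega) (by omega)
      rw [show (j + 1).toNat = j.toNat + 1 from by omega,
          show j + 1 - i = j - i + 1 from by ring] at hrec
      simp only [pvInnerA, innerL]
      rw [← hget]
      split_ifs with h1 h2
      · rfl
      · rfl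
      · exact hrec
  exact haux _ j g ml rfl hij hjN

lemma outerA_bridge (K : Int) (A : List Int) (N i : Int) (ml : Option Int)
    (h0 : 0 ≤ i) (hiN : i ≤ N) (hN : N ≤ (A.length : Int)) :
    (PySem.List.pyRange i N 1).foldl
      (fun ml i => pvInnerA K A i (PySem.List.pyRange i N 1) 0 ml) ml =
    listA K ((A.take N.toNat).drop i.toNat) ml := by
  have haux : ∀ (n : Nat) (j : Int) (ml : Option Int), (N - j).toNat = n → 0 ≤ j → j ≤ N →
      (PySem.List.pyRange j N 1).foldl
        (fun ml i => pvInnerA K A i (PySem.List.pyRange i N 1) 0 ml) ml =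
      listA K ((A.take N.toNat).drop j.toNat) ml := by
    intro n
    induction n with
    | zero =>
      intro j ml hn h0j hjN'
      rw [PySem.List.pyRange_one_eq_nil (by omega)]
      rw [show (A.take N.toNat).drop j.toNat = [] from by
        rw [List.drop_eq_nil_iff, List.length_take]; omega]
      rfl
    | succ n ihn =>
      intro j ml hn h0j hjN'
      have hjltN : j < N := by omega
      have hjlen : j.toNat < (A.take N.toNat).length := by
        rw [List.length_take]; omega
      have hdropc := List.drop_eq_getElem_cons hjlen
      have hinner := innerA_bridge K A N j j 0 ml h0j le_rfl (by omega) hN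
      rw [show j - j = 0 from by ring] at hinner
      have hstep : pvInnerA K A j (PySem.List.pyRange j N 1) 0 ml
          = innerL K ((A.take N.toNat)[j.toNat]'hjlen :: (A.take N.toNat).drop (j.toNat + 1)) 0 0 ml := by
        rw [hinner, hdropc]
      have hIH := ihn (j + 1) (pvInnerA K A j (PySem.List.pyRange j N 1) 0 ml)
        (by omega) (by omega) (by omega)
      rw [show (j + 1).toNat = j.toNat + 1 from by omega] at hIH
      rw [PySem.List.pyRange_one_cons hjltN, List.foldl_cons, hdropc]
      show (PySem.List.pyRange (j + 1) N 1).foldl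
          (fun ml i => pvInnerA K A i (PySem.List.pyRange i N 1) 0 ml)
          (pvInnerA K A j (PySem.List.pyRange j N 1) 0 ml) = _
      rw [hIH, hstep]
      rfl
  exact haux _ i ml rfl h0 hiN

lemma B_bridge (K : Int) (A : List Int) (N : Int) (hN : N ≤ (A.length : Int)) :
    find_min_subsequence_length_alt N K A =
    ((A.take N.toNat).foldl (fun st a => let gl := pvStepB st.1 a; (gl, pvBestScan K gl st.2))
      (([] : List (Int × Int)), -1)).2 := by
  unfold find_min_subsequence_length_alt
  rcases lt_or_ge N 0 with hneg | hpos
  · rw [PySem.List.pyRange_one_eq_nil (by omega), show N.toNat = 0 from by omega]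
    rfl
  · congr 1
    have haux : ∀ (n : Nat) (j : Int) (st : List (Int × Int) × Int),
        (N - j).toNat = n → 0 ≤ j → j ≤ N →
        (PySem.List.pyRange j N 1).foldl
          (fun st j =>
            let a := PySem.List.pyGetD A j 0
            let gl := pvStepB st.1 a
            (gl, pvBestScan K gl st.2)) st
        = ((A.take N.toNat).drop j.toNat).foldl
            (fun st a => let gl := pvStepB st.1 a; (gl, pvBestScan K gl st.2)) st := by
      intro n
      induction n with
      | zero =>
        intro j st hn h0j hjN'
        rw [PySem.List.pyRange_one_eq_nil (by omega)]
        rw [show (A.take N.toNat).drop j.toNat = [] from by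
          rw [List.drop_eq_nil_iff, List.length_take]; omega]
        rfl
      | succ n ihn =>
        intro j st hn h0j hjN'
        have hjltN : j < N := by omega
        have hjlen : j.toNat < (A.take N.toNat).length := by
          rw [List.length_take]; omega
        have hget : PySem.List.pyGetD A j 0 = (A.take N.toNat)[j.toNat]'hjlen := by
          rw [PySem.List.pyGetD_eq_getElem A 0 h0j (by omega)]
          exact (List.getElem_take).symm
        rw [PySem.List.pyRange_one_cons hjltN, List.foldl_cons,
            List.drop_eq_getElem_cons hjlen, List.foldl_cons]
        show (PySem.List.pyRange (j + 1) N 1).foldl _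
            (pvStepB st.1 (PySem.List.pyGetD A j 0),
              pvBestScan K (pvStepB st.1 (PySem.List.pyGetD A j 0)) st.2)
          = ((A.take N.toNat).drop (j.toNat + 1)).foldl _
              (pvStepB st.1 ((A.take N.toNat)[j.toNat]'hjlen),
                pvBestScan K (pvStepB st.1 ((A.take N.toNat)[j.toNat]'hjlen)) st.2)
        rw [hget]
        have hIH := ihn (j + 1)
          (pvStepB st.1 ((A.take N.toNat)[j.toNat]'hjlen),
            pvBestScan K (pvStepB st.1 ((A.take N.toNat)[j.toNat]'hjlen)) st.2)
          (by omega) (by omega) (by omega)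
        rw [show (j + 1).toNat = j.toNat + 1 from by omega] at hIH
        exact hIH
    have := haux (N - 0).toNat 0 (([] : List (Int × Int)), -1) rfl le_rfl hpos
    simpa using this

-- ===== VERDICT (by name: the statement is the Claim_ definition above) =====
theorem find_min_subsequence_length_spec : Claim_equal_find_min_subsequence_length := by
  unfold Claim_equal_find_min_subsequence_length
  intro N K A _ hpre
  obtain ⟨hK, hN⟩ := hpre
  unfold Spec_find_min_subsequence_length
  rw [B_bridge K A N hN]
  have hB := (B_fold_inv K (A.take N.toNat)).2
  set xs := A.take N.toNat with hxs
  set b := (xs.foldl (fun st a => let gl := pvStepB st.1 a; (gl, pvBestScan K gl st.2))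
    (([] : List (Int × Int)), -1)).2 with hbdef
  have hbneg : (∀ m, ¬ KwinIn xs K m) → b = -1 := by
    intro hno
    rcases hB with ⟨hnone, -⟩ | ⟨m, -, hQ, -⟩
    · by_cases hb : b = -1
      · exact hb
      · simp [ob, hb] at hnone
    · exact absurd hQ (hno m)
  unfold find_min_subsequence_length
  by_cases hval : (A.any fun a => PySem.Int.mod a K == 0) = false
  · have hno : ∀ m, ¬ KwinIn xs K m := by
      rintro m ⟨w, hinf, hne, hwg, -⟩
      obtain ⟨x, hx⟩ := List.exists_mem_of_ne_nil w hne
      have hdvd : K ∣ x := hwg ▸ wgcd_dvd_mem w x hx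
      have hxA : x ∈ A := List.mem_of_mem_take (hinf.subset hx)
      have htrue : (A.any fun a => PySem.Int.mod a K == 0) = true :=
        List.any_eq_true.mpr ⟨x, hxA, by
          simp only [beq_iff_eq]
          exact (PySem.Int.mod_eq_zero_iff_dvd x K).mpr hdvd⟩
      rw [hval] at htrue
      simp at htrue
    simp only [hval]
    rw [if_pos trivial]
    exact (hbneg hno).symm
  · have hval' : (A.any fun a => PySem.Int.mod a K == 0) = true := by
      cases hA : (A.any fun a => PySem.Int.mod a K == 0) with
      | false => exact absurd hA hval
      | true => rfl
    simp only [hval']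
    rw [if_neg (by simp)]
    rcases lt_or_ge N 0 with hN0 | hN0
    · rw [PySem.List.pyRange_one_eq_nil (by omega)]
      have hxsnil : xs = [] := by rw [hxs, show N.toNat = 0 from by omega, List.take_zero]
      have hno : ∀ m, ¬ KwinIn xs K m := by
        rintro m ⟨w, hinf, hne, -, -⟩
        rw [hxsnil] at hinf
        exact hne (List.eq_nil_of_infix_nil hinf)
      show (-1 : Int) = b
      exact (hbneg hno).symm
    · rw [outerA_bridge K A N 0 none le_rfl hN0 hN]
      rw [show ((0 : Int)).toNat = 0 from rfl, List.drop_zero]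
      rcases lt_trichotomy K 0 with hKneg | hK0 | hKpos
      · rw [listA_neg K hKneg]
        have hno : ∀ m, ¬ KwinIn xs K m := by
          rintro m ⟨w, -, -, hwg, -⟩
          have := wgcd_nonneg w
          omega
        exact (hbneg hno).symm
      · exact absurd hK0 hK
      · have hA := listA_MinOn K hKpos xs
        have heq := MinOn_unique _ _ _ hA hB
        by_cases hb : b = -1
        · rw [heq]
          simp [ob, hb]
        · rw [heq]
          simp [ob, hb]
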